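-- pv_equiv track=rewrite | github.com/Nah0ris/footy | match_predictor.py | validate_lineup
-- ===== SOURCE A (Python) =====
-- POSITION_ROLE = {
--     "GK":  "GK",
--     "DEF": "DEF",
--     "MID": "MID",
--     "FWD": "FWD",
-- }
--
-- def validate_lineup(players: list[dict]) -> tuple[bool, str]:
--     """
--     Validate an 11-player lineup dict list.
--     Each player dict must have: { position, overall, shooting, defending, ... }
--     Returns (is_valid, error_message).
--     """
--     if len(players) != 11:
--         return False, f"Need exactly 11 players, got {len(players)}."
--
--     gk_count  = sum(1 for p in players if p.get("position") == "GK")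
--     fwd_count = sum(1 for p in players if POSITION_ROLE.get(p.get("position")) == "FWD")
--     def_count = sum(1 for p in players if POSITION_ROLE.get(p.get("position")) == "DEF")
--
--     if gk_count != 1:
--         return False, f"Lineup must have exactly 1 goalkeeper (found {gk_count})."
--     if fwd_count < 1:
--         return False, "Lineup must have at least 1 forward (ST / CF / LW / RW)."
--     if def_count < 2:
--         return False, "Lineup must have at least 2 defenders."
--
--     return True, ""
-- ===== SOURCE B (Python) =====
-- POSITION_ROLE = {
--     "GK":  "GK",
--     "DEF": "DEF",
--     "MID": "MID",
--     "FWD": "FWD",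
-- }
--
-- def validate_lineup(players: list[dict]) -> tuple[bool, str]:
--     """Single-pass role tally instead of three full scans."""
--     if len(players) != 11:
--         return False, f"Need exactly 11 players, got {len(players)}."
--
--     roles = [r for p in players if (r := POSITION_ROLE.get(p.get("position"))) is not None]
--     tally = {}
--     for r in roles:
--         tally[r] = tally.get(r, 0) + 1
--
--     gk = tally.get("GK", 0)
--     if gk != 1:
--         return False, f"Lineup must have exactly 1 goalkeeper (found {gk})."
--     if tally.get("FWD", 0) < 1:
--         return False, "Lineup must have at least 1 forward (ST / CF / LW / RW)."
--     if tally.get("DEF", 0) < 2: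
--         return False, "Lineup must have at least 2 defenders."
--
--     return True, ""
-- ===== Notes on version B (the rewrite author's own statement) =====
-- stated objective: alternative
-- what changed: B replaces A's three separate full scans of the player list (one per guard) with a single pass that builds a role tally dict, from which all three guard counts are read by constant lookups; A's raw position=='GK' count is proved equal to the tally's GK-role count.
import Mathlib
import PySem

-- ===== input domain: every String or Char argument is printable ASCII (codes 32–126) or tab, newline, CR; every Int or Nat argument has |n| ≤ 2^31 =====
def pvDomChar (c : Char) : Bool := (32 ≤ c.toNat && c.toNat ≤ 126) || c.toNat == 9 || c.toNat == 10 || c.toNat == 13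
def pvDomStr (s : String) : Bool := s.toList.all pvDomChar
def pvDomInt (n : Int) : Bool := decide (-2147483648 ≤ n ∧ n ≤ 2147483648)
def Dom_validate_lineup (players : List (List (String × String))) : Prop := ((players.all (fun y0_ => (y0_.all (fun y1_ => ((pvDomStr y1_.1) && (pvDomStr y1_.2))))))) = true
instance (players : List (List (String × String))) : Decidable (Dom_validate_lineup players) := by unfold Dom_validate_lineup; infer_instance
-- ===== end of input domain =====

-- B differs from A only in structure: one tally-building pass replaces three scans; return values are identical.

-- ===== PORT A =====
def POSITION_ROLE : PySem.Dict String String :=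
  PySem.Dict.mk [("GK", "GK"), ("DEF", "DEF"), ("MID", "MID"), ("FWD", "FWD")]

-- POSITION_ROLE.get(p.get("position")) : a None position falls through to None (used by both ports)
def positionRoleGet (p : List (String × String)) : Option String :=
  match PySem.Dict.get? (PySem.Dict.mk p) "position" with
  | none => none
  | some pos => PySem.Dict.get? POSITION_ROLE pos

def validate_lineup (players : List (List (String × String))) : Bool × String :=
  if players.length ≠ 11 then
    (false, "Need exactly 11 players, got " ++ PySem.Int.toStr (players.length : Int) ++ ".")
  else
    -- sum(1 for p in players if cond)
    let gk_count : Int := ((players.filter (fun p => PySem.Dict.get? (PySem.Dict.mk p) "position" == some "GK")).map (fun _ => (1 : Int))).sum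
    let fwd_count : Int := ((players.filter (fun p => positionRoleGet p == some "FWD")).map (fun _ => (1 : Int))).sum
    let def_count : Int := ((players.filter (fun p => positionRoleGet p == some "DEF")).map (fun _ => (1 : Int))).sum
    if gk_count ≠ 1 then
      (false, "Lineup must have exactly 1 goalkeeper (found " ++ PySem.Int.toStr gk_count ++ ").")
    else if fwd_count < 1 then
      (false, "Lineup must have at least 1 forward (ST / CF / LW / RW).")
    else if def_count < 2 then
      (false, "Lineup must have at least 2 defenders.")
    else
      (true, "")

-- ===== PORT B =====
def validate_lineup_alt (players : List (List (String × String))) : Bool × String :=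
  if players.length ≠ 11 then
    (false, "Need exactly 11 players, got " ++ PySem.Int.toStr (players.length : Int) ++ ".")
  else
    let roles : List String := players.filterMap positionRoleGet
    let tally : PySem.Dict String Int :=
      roles.foldl (fun d r => d.insert r (d.getD r 0 + 1)) PySem.Dict.empty
    let gk : Int := tally.getD "GK" 0
    if gk ≠ 1 then
      (false, "Lineup must have exactly 1 goalkeeper (found " ++ PySem.Int.toStr gk ++ ").")
    else if tally.getD "FWD" 0 < 1 then
      (false, "Lineup must have at least 1 forward (ST / CF / LW / RW).")
    else if tally.getD "DEF" 0 < 2 then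
      (false, "Lineup must have at least 2 defenders.")
    else
      (true, "")

-- ===== PRECONDITION & SPEC =====
def Spec_validate_lineup (players : List (List (String × String))) (out : Bool × String) : Prop := out = validate_lineup_alt players
instance (players : List (List (String × String))) (out : Bool × String) : Decidable (Spec_validate_lineup players out) := by unfold Spec_validate_lineup; infer_instance

-- ===== CLAIM (what is proved, stated in full; the proofs are below) =====
def Claim_equal_validate_lineup : Prop := ∀ (players : List (List (String × String))), Dom_validate_lineup players → Spec_validate_lineup players (validate_lineup players)

-- ===== LEMMAS AND PROOFS =====

-- a 0/1-sum over a filter is a countP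
theorem sum_ones_filter {α : Type} (l : List α) (c : α → Bool) :
    ((l.filter c).map (fun _ => (1 : Int))).sum = ((l.countP c : Nat) : Int) := by
  simp [List.countP_eq_length_filter]

-- the tally's count of role r is the number of players whose role is r
theorem tally_getD (l : List (List (String × String))) (r : String) :
    ((l.filterMap positionRoleGet).foldl (fun d x => d.insert x (d.getD x 0 + 1)) PySem.Dict.empty).getD r 0
      = ((l.countP (fun p => positionRoleGet p == some r) : Nat) : Int) := by
  rw [PySem.Dict.getD_foldl_insert_add_one]
  simp [List.count_filterMap]

-- POSITION_ROLE maps only "GK" to "GK", so the GK-role test is the raw-position test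
theorem role_gk (p : List (String × String)) :
    (positionRoleGet p == some "GK") = (PySem.Dict.get? (PySem.Dict.mk p) "position" == some "GK") := by
  unfold positionRoleGet
  cases h : PySem.Dict.get? (PySem.Dict.mk p) "position" with
  | none => simp
  | some s =>
    by_cases hs : s = "GK"
    · subst hs; decide
    · simp [POSITION_ROLE, PySem.Dict.get?_mk_cons]
      split_ifs <;> simp_all [eq_comm, PySem.Dict.get?]

-- ===== VERDICT (by name: the statement is the Claim_ definition above) =====
theorem validate_lineup_spec : Claim_equal_validate_lineup := by
  intro players _
  unfold Spec_validate_lineup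
  have hgk : (fun p => positionRoleGet p == some "GK")
      = (fun p => PySem.Dict.get? (PySem.Dict.mk p) "position" == some "GK") := funext role_gk
  simp only [validate_lineup, validate_lineup_alt, sum_ones_filter, tally_getD, hgk]
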